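-- pv_equiv track=rewrite | github.com/jcellomarcano/proyecto_ai_1 | Problemas/Npuzzle/GeneradorNpuzzle.py | generarRegla
-- ===== SOURCE A (Python) =====
-- def generarRegla(posIniBlanco, posIniX, limite):
--     """ Entrada
--         -------
--         * posIniBlanco // Posición inicial del blanco
--         * posIniX      // Posición inicial de la X, que es donde se quiere colocar
--                           el blanco.
--         * limite       // Cantidad de posiciones que existen en el tablero.
--         Salida
--         -------
--         * cadena       // Cadena de caracteres que contiene la regla.
--     """
--     cadena = ""
--     # Imprimir la parte izquierda de la regla
--     for i in range(1,limite+1):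
--         if i == posIniBlanco:
--             cadena += "0 "
--         elif i == posIniX:
--             cadena += "X "
--         else:
--             cadena += "- "
--     cadena += "=> "
--     # Imprimir la parte izquierda de la regla
--     # (La posición del blanco se intercambia con la de la X)
--     for i in range(1,limite+1):
--         if i == posIniBlanco:
--             cadena += "X "
--         elif i == posIniX:
--             cadena += "0 "
--         else:
--             cadena += "- "
--     return cadena
-- ===== SOURCE B (Python) =====
-- def generarRegla(posIniBlanco, posIniX, limite):
--     # Build only the left half; the right half is the left half with 0 and X swapped.
--     parts = []
--     for i in range(1, limite + 1):
--         if i == posIniBlanco: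
--             parts.append("0 ")
--         elif i == posIniX:
--             parts.append("X ")
--         else:
--             parts.append("- ")
--     left = "".join(parts)
--     return left + "=> " + left.translate(str.maketrans("0X", "X0"))
-- ===== Notes on version B (the rewrite author's own statement) =====
-- stated objective: simpler
-- what changed: B builds only the left half of the rule in one branching loop (list of parts joined once) and derives the right half by str.translate swapping '0' and 'X', replacing A's second independent branching loop and its repeated string concatenation.
import Mathlib
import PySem

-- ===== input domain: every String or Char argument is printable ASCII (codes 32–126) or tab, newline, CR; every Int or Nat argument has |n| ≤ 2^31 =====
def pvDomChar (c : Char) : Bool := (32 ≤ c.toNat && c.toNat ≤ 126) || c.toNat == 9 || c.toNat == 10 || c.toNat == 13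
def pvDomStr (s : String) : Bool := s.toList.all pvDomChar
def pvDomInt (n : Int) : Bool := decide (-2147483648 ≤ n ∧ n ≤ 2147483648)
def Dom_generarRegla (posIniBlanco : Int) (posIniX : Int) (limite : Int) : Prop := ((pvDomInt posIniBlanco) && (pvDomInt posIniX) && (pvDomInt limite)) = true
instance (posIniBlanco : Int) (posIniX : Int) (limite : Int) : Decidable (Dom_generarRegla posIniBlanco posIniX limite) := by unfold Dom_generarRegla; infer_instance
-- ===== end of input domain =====

-- B builds only the left half of the rule in one loop and derives the right half by
-- a character translation swapping '0' and 'X' (same cost, simpler decomposition).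


-- ===== PORT A =====
-- A: two independent branching loops over range(1, limite+1); strings handled as List Char.
def generarRegla (posIniBlanco : Int) (posIniX : Int) (limite : Int) : String :=
  let r := PySem.List.pyRange 1 (limite + 1) 1
  let cadena : List Char :=
    r.foldl (fun c i =>
      c ++ (if i = posIniBlanco then ['0', ' ']
            else if i = posIniX then ['X', ' ']
            else ['-', ' '])) []
  let cadena := cadena ++ ['=', '>', ' ']
  let cadena :=
    r.foldl (fun c i =>
      c ++ (if i = posIniBlanco then ['X', ' ']
            else if i = posIniX then ['0', ' ']
            else ['-', ' '])) cadena
  String.mk cadena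

-- ===== PORT B =====
-- str.translate(str.maketrans("0X", "X0")) as a per-character map.
def pvSwap0X (c : Char) : Char := if c = '0' then 'X' else if c = 'X' then '0' else c

def generarRegla_alt (posIniBlanco : Int) (posIniX : Int) (limite : Int) : String :=
  let parts : List (List Char) :=
    (PySem.List.pyRange 1 (limite + 1) 1).foldl (fun ps i =>
      ps ++ [if i = posIniBlanco then ['0', ' ']
             else if i = posIniX then ['X', ' ']
             else ['-', ' ']]) []
  let left := parts.flatten
  String.mk (left ++ ['=', '>', ' '] ++ left.map pvSwap0X)

-- ===== PRECONDITION & SPEC =====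
def Spec_generarRegla (posIniBlanco : Int) (posIniX : Int) (limite : Int) (out : String) : Prop := out = generarRegla_alt posIniBlanco posIniX limite
instance (posIniBlanco : Int) (posIniX : Int) (limite : Int) (out : String) : Decidable (Spec_generarRegla posIniBlanco posIniX limite out) := by unfold Spec_generarRegla; infer_instance

-- ===== CLAIM (what is proved, stated in full; the proofs are below) =====
def Claim_equal_generarRegla : Prop := ∀ (posIniBlanco : Int) (posIniX : Int) (limite : Int), Dom_generarRegla posIniBlanco posIniX limite → Spec_generarRegla posIniBlanco posIniX limite (generarRegla posIniBlanco posIniX limite)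

-- ===== LEMMAS AND PROOFS =====

-- flatten of a map-to-singletons is the plain map ("".join of the parts list)
theorem pv_flatten_map_singleton {α β : Type} (g : α → β) (L : List α) :
    (L.map (fun x => [g x])).flatten = L.map g := by
  rw [← List.flatMap_def, ← List.map_eq_flatMap]

-- swapping 0↔X in a left piece yields exactly A's right piece
theorem map_swap_piece (b x i : Int) :
    (if i = b then ['0', ' '] else if i = x then ['X', ' '] else ['-', ' ']).map pvSwap0X
      = (if i = b then ['X', ' '] else if i = x then ['0', ' '] else ['-', ' ']) := by
  split_ifs <;> decide

-- ===== VERDICT (by name: the statement is the Claim_ definition above) =====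
theorem generarRegla_spec : Claim_equal_generarRegla := by
  intro b x l _
  unfold Spec_generarRegla generarRegla generarRegla_alt
  simp only [PySem.List.foldl_append_eq_flatMap, List.nil_append, List.flatMap_def,
    pv_flatten_map_singleton]
  congr 2
  rw [List.map_flatten, List.map_map]
  congr 1
  apply List.map_congr_left
  intro i _
  exact (map_swap_piece b x i).symm
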